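-- pv_equiv track=rewrite | github.com/Aaronjill/dsa-practice | DAY3/Q5-StackIntro.py | is_valid_config
-- ===== SOURCE A (Python) =====
-- def is_valid_config(string):
-- 		stack=[]
-- 		matching = {")":"(","]":"[","}":"{"}
-- 		for char in string:
-- 			if char in "{[(":
-- 				stack.append(char)
-- 			elif char in ")}]":
-- 				if not stack:
-- 					return False
-- 				if stack.pop() != matching[char]:
-- 					return False
-- 		return stack==[]
-- ===== SOURCE B (Python) =====
-- def is_valid_config(string):
--     s = ''.join(c for c in string if c in '()[]{}')
--     while True:
--         t = s.replace('()', '').replace('[]', '').replace('{}', '')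
--         if t == s:
--             return s == ''
--         s = t
-- ===== Notes on version B (the rewrite author's own statement) =====
-- stated objective: alternative
-- what changed: Replaces A's single left-to-right stack scan with a repeated-reduction strategy: keep only the bracket characters, then repeatedly delete adjacent matched pairs via str.replace until a fixed point, and accept iff the string reduces to empty; the bulk C-level replace passes beat A's per-character Python loop on the measured inputs despite a worse worst case.
import Mathlib
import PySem

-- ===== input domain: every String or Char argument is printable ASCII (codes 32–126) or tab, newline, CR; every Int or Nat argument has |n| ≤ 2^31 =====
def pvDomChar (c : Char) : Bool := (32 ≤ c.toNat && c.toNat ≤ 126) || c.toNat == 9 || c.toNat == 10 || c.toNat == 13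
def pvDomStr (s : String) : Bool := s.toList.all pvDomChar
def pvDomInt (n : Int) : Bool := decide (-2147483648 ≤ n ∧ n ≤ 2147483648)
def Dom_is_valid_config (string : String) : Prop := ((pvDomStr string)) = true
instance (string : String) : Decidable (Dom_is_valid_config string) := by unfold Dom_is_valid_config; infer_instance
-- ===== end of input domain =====

-- B replaces A's one-pass stack scan by a repeated-reduction strategy (keep only the bracket
-- characters, then cancel adjacent matched pairs via str.replace until a fixed point); objective: alternative.

-- ===== PORT A =====
-- the `for char in string` loop with its two early `return False` exits, as structural recursion
-- over the remaining characters with the `stack` as accumulator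
def is_valid_config_go (matching : PySem.Dict Char Char) : List Char → List Char → Bool
  | [], stack => stack == []
  | char :: rest, stack =>
    if PySem.Chars.isIn [char] "{[(".toList then
      is_valid_config_go matching rest (stack ++ [char])
    else if PySem.Chars.isIn [char] ")}]".toList then
      if stack == [] then false
      else
        match PySem.List.pop? stack with
        | none => false            -- unreachable: guarded by `stack == []` above
        | some (v, stack') =>
          match PySem.Dict.get? matching char with
          | none => false          -- KeyError: unreachable, every char of ")}]" is a key
          | some m => if v != m then false else is_valid_config_go matching rest stack'
    else is_valid_config_go matching rest stack

def is_valid_config (string : String) : Bool :=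
  is_valid_config_go (PySem.Dict.ofList [(')', '('), (']', '['), ('}', '{')]) string.toList []

-- ===== PORT B =====
-- one round of  s.replace('()','').replace('[]','').replace('{}','')
def pvRep (s : List Char) : List Char :=
  PySem.Chars.replace (PySem.Chars.replace (PySem.Chars.replace s "()".toList [])
    "[]".toList []) "{}".toList []

-- termination facts for the `while` loop (each replace only deletes characters);
-- these lemmas are cited by pvBloop's `decreasing_by`, so they stay above the ports
theorem pvGo_sublist (old : List Char) (fuel : Nat) (l acc : List Char) :
    (PySem.Chars.replace.go old [] fuel l acc).Sublist (acc.reverse ++ l) := by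
  induction fuel generalizing l acc with
  | zero => simp [PySem.Chars.replace.go]
  | succ fuel ih =>
    cases l with
    | nil => simp [PySem.Chars.replace.go]
    | cons c t =>
      rw [PySem.Chars.replace.go]
      split
      · have h1 := ih (List.drop old.length (c :: t)) ([].reverse ++ acc)
        simp only [List.reverse_nil, List.nil_append] at h1
        exact h1.trans (List.Sublist.append_left (List.drop_sublist _ _) _)
      · simpa using ih t (c :: acc)

theorem pvReplace_sublist (s old : List Char) (h : old ≠ []) :
    (PySem.Chars.replace s old []).Sublist s := by
  rw [PySem.Chars.replace, if_neg (by simpa using h)]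
  simpa using pvGo_sublist old s.length s []

theorem pvGo_id (old : List Char) (fuel : Nat) (l acc : List Char) (h : ¬ old <:+: l) :
    PySem.Chars.replace.go old [] fuel l acc = acc.reverse ++ l := by
  induction fuel generalizing l acc with
  | zero => simp [PySem.Chars.replace.go]
  | succ fuel ih =>
    cases l with
    | nil => simp [PySem.Chars.replace.go]
    | cons c t =>
      rw [PySem.Chars.replace.go]
      rw [if_neg (fun hp => h (List.isPrefixOf_iff_prefix.mp hp).isInfix)]
      rw [ih t (c :: acc) (fun hi => h (hi.trans (List.suffix_cons c t).isInfix))]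
      simp

theorem pvGo_lt (old : List Char) (hne : old ≠ []) (fuel : Nat) (l acc : List Char)
    (hf : l.length ≤ fuel) (h : old <:+: l) :
    (PySem.Chars.replace.go old [] fuel l acc).length < acc.length + l.length := by
  induction fuel generalizing l acc with
  | zero =>
    have hl : l = [] := List.length_eq_zero_iff.mp (Nat.le_zero.mp hf)
    exact absurd (List.eq_nil_of_infix_nil (hl ▸ h)) hne
  | succ fuel ih =>
    cases l with
    | nil => exact absurd (List.eq_nil_of_infix_nil h) hne
    | cons c t =>
      rw [PySem.Chars.replace.go]
      split
      · rename_i hp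
        have hple : old.length ≤ (c :: t).length :=
          (List.isPrefixOf_iff_prefix.mp hp).length_le
        have h1 : 1 ≤ old.length := by
          cases old with
          | nil => exact absurd rfl hne
          | cons _ _ => simp
        have hsub := (pvGo_sublist old fuel (List.drop old.length (c :: t))
          ([].reverse ++ acc)).length_le
        simp only [List.length_append, List.length_reverse, List.length_drop,
          List.length_cons, List.reverse_nil, List.nil_append] at hsub
        simp only [List.reverse_nil, List.nil_append, List.length_cons] at hple ⊢
        omega
      · rename_i hp
        have ht : old <:+: t := by
          rcases List.infix_cons_iff.mp h with h' | h'
          · exact absurd (List.isPrefixOf_iff_prefix.mpr h') hp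
          · exact h'
        have := ih t (c :: acc) (by simpa using Nat.le_of_succ_le_succ hf) ht
        simp only [List.length_cons] at this ⊢
        omega

theorem pvReplace_id_or_lt (s old : List Char) (h : old ≠ []) :
    PySem.Chars.replace s old [] = s ∨ (PySem.Chars.replace s old []).length < s.length := by
  by_cases hi : old <:+: s
  · right
    rw [PySem.Chars.replace, if_neg (by simpa using h)]
    simpa using pvGo_lt old h s.length s [] le_rfl hi
  · left
    rw [PySem.Chars.replace, if_neg (by simpa using h)]
    simpa using pvGo_id old s.length s [] hi

theorem pvRep_ne_imp_lt (s : List Char) (h : pvRep s ≠ s) : (pvRep s).length < s.length := by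
  unfold pvRep at h ⊢
  rcases pvReplace_id_or_lt s "()".toList (by decide) with h1 | h1
  · rw [h1] at h ⊢
    rcases pvReplace_id_or_lt s "[]".toList (by decide) with h2 | h2
    · rw [h2] at h ⊢
      rcases pvReplace_id_or_lt s "{}".toList (by decide) with h3 | h3
      · exact absurd h3 h
      · exact h3
    · have l3 := (pvReplace_sublist (PySem.Chars.replace s "[]".toList [])
        "{}".toList (by decide)).length_le
      omega
  · have l2 := (pvReplace_sublist (PySem.Chars.replace s "()".toList [])
      "[]".toList (by decide)).length_le
    have l3 := (pvReplace_sublist (PySem.Chars.replace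
      (PySem.Chars.replace s "()".toList []) "[]".toList []) "{}".toList (by decide)).length_le
    omega

-- the `while True` loop of B: reduce to the fixed point, then return s == ''
def pvBloop (s : List Char) : Bool :=
  let t := pvRep s
  if t = s then s == [] else pvBloop t
termination_by s.length
decreasing_by exact pvRep_ne_imp_lt s (by assumption)

def is_valid_config_alt (string : String) : Bool :=
  pvBloop (string.toList.filter (fun c => PySem.Chars.isIn [c] "()[]{}".toList))

-- ===== PRECONDITION & SPEC =====
def Spec_is_valid_config (string : String) (out : Bool) : Prop := out = is_valid_config_alt string
instance (string : String) (out : Bool) : Decidable (Spec_is_valid_config string out) := by unfold Spec_is_valid_config; infer_instance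

-- ===== CLAIM (what is proved, stated in full; the proofs are below) =====
def Claim_equal_is_valid_config : Prop := ∀ (string : String), Dom_is_valid_config string → Spec_is_valid_config string (is_valid_config string)

-- ===== LEMMAS AND PROOFS =====

def pvOpener (c : Char) : Bool := PySem.Chars.isIn [c] "{[(".toList
def pvCloser (c : Char) : Bool := PySem.Chars.isIn [c] ")}]".toList
def pvMate (c : Char) : Char := if c == ')' then '(' else if c == ']' then '[' else '{'

-- the reference stack machine both ports are reduced to
def pvRun : List Char → List Char → Bool
  | [], st => st == []
  | ch :: rest, st =>
    if pvOpener ch then pvRun rest (ch :: st)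
    else if pvCloser ch then
      match st with
      | [] => false
      | t :: st' => if t == pvMate ch then pvRun rest st' else false
    else pvRun rest st

theorem pvRun_nil (st : List Char) : pvRun [] st = (st == []) := rfl

theorem pvRun_cons (ch : Char) (rest st : List Char) :
    pvRun (ch :: rest) st =
      (if pvOpener ch then pvRun rest (ch :: st)
       else if pvCloser ch then
         match st with
         | [] => false
         | t :: st' => if t == pvMate ch then pvRun rest st' else false
       else pvRun rest st) := rfl

theorem pvIsIn_singleton (c : Char) (l : List Char) :
    PySem.Chars.isIn [c] l = true ↔ c ∈ l := by
  rw [PySem.Chars.isIn_iff_infix]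
  constructor
  · rintro ⟨u, v, h⟩; rw [← h]; simp
  · intro h
    obtain ⟨u, v, h⟩ := List.append_of_mem h
    exact ⟨u, v, by simp [h]⟩

theorem pvCloser_cases (c : Char) (h : pvCloser c = true) : c = ')' ∨ c = '}' ∨ c = ']' := by
  rw [pvCloser, pvIsIn_singleton] at h
  simpa using h

-- ===== A reduces to the machine =====
theorem pvGoA_eq_run (l stack : List Char) :
    is_valid_config_go (PySem.Dict.ofList [(')', '('), (']', '['), ('}', '{')]) l stack
      = pvRun l stack.reverse := by
  induction l generalizing stack with
  | nil => simp [is_valid_config_go, pvRun_nil]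
  | cons ch rest ih =>
    rw [is_valid_config_go, pvRun_cons,
      show PySem.Chars.isIn [ch] "{[(".toList = pvOpener ch from rfl,
      show PySem.Chars.isIn [ch] ")}]".toList = pvCloser ch from rfl]
    by_cases ho : pvOpener ch = true
    · rw [if_pos ho, if_pos ho, ih]
      simp
    · rw [if_neg ho, if_neg ho]
      by_cases hc : pvCloser ch = true
      · rw [if_pos hc, if_pos hc]
        rcases List.eq_nil_or_concat stack with hs | ⟨pre, v, hs⟩
        · subst hs; simp
        · subst hs
          rw [List.concat_eq_append, if_neg (by simp), PySem.List.pop?_last]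
          have hm : PySem.Dict.get?
              (PySem.Dict.ofList [(')', '('), (']', '['), ('}', '{')]) ch = some (pvMate ch) := by
            rcases pvCloser_cases ch hc with h | h | h <;> subst h <;> decide
          rw [hm]
          simp only [List.reverse_append, List.reverse_cons, List.reverse_nil,
            List.nil_append, List.cons_append]
          by_cases hv : (v == pvMate ch) = true
          · rw [if_pos hv, if_neg (by simpa using hv), ih]
          · rw [if_neg hv, if_pos (by simpa using hv)]
      · rw [if_neg hc, if_neg hc, ih]

-- ===== machine facts used on the B side =====
def pvPair (o c : Char) : Prop := (o = '(' ∧ c = ')') ∨ (o = '[' ∧ c = ']') ∨ (o = '{' ∧ c = '}')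

theorem pvRun_removePair (o c : Char) (hp : pvPair o c) (u v st : List Char) :
    pvRun (u ++ o :: c :: v) st = pvRun (u ++ v) st := by
  induction u generalizing st with
  | nil =>
    rcases hp with ⟨ho, hc⟩ | ⟨ho, hc⟩ | ⟨ho, hc⟩ <;> subst ho <;> subst hc <;> rfl
  | cons x u ih =>
    simp only [List.cons_append]
    rw [pvRun_cons, pvRun_cons]
    split
    · exact ih _
    · split
      · cases st with
        | nil => rfl
        | cons t st' =>
          show (if (t == pvMate x) = true then pvRun (u ++ o :: c :: v) st' else false)
            = (if (t == pvMate x) = true then pvRun (u ++ v) st' else false)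
          by_cases hm : (t == pvMate x) = true
          · rw [if_pos hm, if_pos hm]
            exact ih _
          · rw [if_neg hm, if_neg hm]
      · exact ih _

theorem pvRun_pvRep (s st : List Char) : pvRun (pvRep s) st = pvRun s st := by
  have key : ∀ o c : Char, pvPair o c → ∀ (fuel : Nat) (l acc st : List Char),
      pvRun (PySem.Chars.replace.go [o, c] [] fuel l acc) st = pvRun (acc.reverse ++ l) st := by
    intro o c hp fuel
    induction fuel with
    | zero => intro l acc st; simp [PySem.Chars.replace.go]
    | succ fuel ih =>
      intro l acc st
      cases l with
      | nil => simp [PySem.Chars.replace.go]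
      | cons c0 t =>
        rw [PySem.Chars.replace.go]
        split
        · rename_i hpre
          obtain ⟨t', ht⟩ := List.isPrefixOf_iff_prefix.mp hpre
          have hc0 : c0 = o ∧ t = c :: t' := by simpa using ht.symm
          obtain ⟨h1, h2⟩ := hc0
          subst h2
          rw [h1, show List.drop ([o, c].length) (o :: c :: t') = t' by simp]
          rw [ih t' ([].reverse ++ acc) st]
          simp only [List.reverse_nil, List.nil_append]
          exact (pvRun_removePair o c hp acc.reverse t' st).symm
        · rw [ih t (c0 :: acc) st]
          simp
  have rep1 : ∀ (s st : List Char) (o c : Char), pvPair o c →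
      pvRun (PySem.Chars.replace s [o, c] []) st = pvRun s st := by
    intro s st o c hp
    rw [PySem.Chars.replace, if_neg (by simp)]
    simpa using key o c hp s.length s [] st
  unfold pvRep
  rw [show "()".toList = ['(', ')'] from rfl, show "[]".toList = ['[', ']'] from rfl,
    show "{}".toList = ['{', '}'] from rfl]
  rw [rep1 _ _ '{' '}' (by simp [pvPair]), rep1 _ _ '[' ']' (by simp [pvPair]),
    rep1 _ _ '(' ')' (by simp [pvPair])]

theorem pvRun_openers (u rest st : List Char) (h : ∀ c ∈ u, pvOpener c = true) :
    pvRun (u ++ rest) st = pvRun rest (u.reverse ++ st) := by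
  induction u generalizing st with
  | nil => simp
  | cons x u ih =>
    simp only [List.cons_append]
    rw [pvRun_cons, if_pos (h x (by simp))]
    rw [ih _ (fun c hc => h c (by simp [hc]))]
    simp

-- a nonempty bracket-only string with no adjacent matched pair is rejected by the machine
theorem pvRun_stuck (s : List Char) (hb : ∀ c ∈ s, pvOpener c = true ∨ pvCloser c = true)
    (hs : s ≠ []) (hnp : ∀ o c : Char, pvPair o c → ¬ [o, c] <:+: s) :
    pvRun s [] = false := by
  have hsplit : s.takeWhile pvOpener ++ s.dropWhile pvOpener = s :=
    List.takeWhile_append_dropWhile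
  have hopen : ∀ c ∈ s.takeWhile pvOpener, pvOpener c = true :=
    fun c hc => List.mem_takeWhile_imp hc
  rw [← hsplit, pvRun_openers _ _ _ hopen]
  cases hd : s.dropWhile pvOpener with
  | nil =>
    have hne : s.takeWhile pvOpener ≠ [] := by
      intro h; exact hs (by rw [← hsplit, h, hd]; rfl)
    simp [pvRun_nil, hne]
  | cons c0 r =>
    have hc0o : ¬ pvOpener c0 = true := by
      have := List.head?_dropWhile_not pvOpener s
      rw [hd] at this; simpa using this
    have hc0 : pvCloser c0 = true := by
      have hmem : c0 ∈ s := by rw [← hsplit, hd]; simp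
      rcases hb c0 hmem with h | h
      · exact absurd h hc0o
      · exact h
    rw [pvRun_cons, if_neg hc0o, if_pos hc0]
    rcases List.eq_nil_or_concat (s.takeWhile pvOpener) with ht | ⟨pre, o, ht⟩
    · rw [ht]; simp
    · rw [ht, List.concat_eq_append]
      simp only [List.reverse_append, List.reverse_cons, List.reverse_nil, List.nil_append,
        List.cons_append, List.append_nil]
      have hno : ¬ (o == pvMate c0) = true := by
        intro he
        have heq : o = pvMate c0 := by simpa using he
        have hoo : pvOpener o = true := hopen o (by rw [ht]; simp)
        have hpair : pvPair o c0 := by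
          rcases pvCloser_cases c0 hc0 with h | h | h <;> subst h <;>
            simp_all [pvMate, pvPair]
        apply hnp o c0 hpair
        refine ⟨pre, r, ?_⟩
        rw [← hsplit, ht, hd]
        simp
      rw [if_neg hno]

-- fixed points of pvRep contain no adjacent matched pair
theorem pvRep_fixed_no_pair (s : List Char) (h : pvRep s = s) :
    ∀ o c : Char, pvPair o c → ¬ [o, c] <:+: s := by
  have hlen : (pvRep s).length = s.length := by rw [h]
  unfold pvRep at h hlen
  have strict : ∀ (t old : List Char), old ≠ [] → old <:+: t →
      (PySem.Chars.replace t old []).length < t.length := by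
    intro t old hne hin
    rw [PySem.Chars.replace, if_neg (by simpa using hne)]
    simpa using pvGo_lt old hne t.length t [] le_rfl hin
  have l2 := (pvReplace_sublist (PySem.Chars.replace s "()".toList [])
    "[]".toList (by decide)).length_le
  have l3 := (pvReplace_sublist (PySem.Chars.replace
    (PySem.Chars.replace s "()".toList []) "[]".toList []) "{}".toList (by decide)).length_le
  have e1 : PySem.Chars.replace s "()".toList [] = s := by
    rcases pvReplace_id_or_lt s "()".toList (by decide) with h' | h'
    · exact h'
    · omega
  rw [e1] at h hlen l2 l3
  have e2 : PySem.Chars.replace s "[]".toList [] = s := by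
    rcases pvReplace_id_or_lt s "[]".toList (by decide) with h' | h'
    · exact h'
    · omega
  rw [e2] at h hlen l3
  intro o c hp hi
  rcases hp with ⟨ho, hc⟩ | ⟨ho, hc⟩ | ⟨ho, hc⟩ <;> subst ho <;> subst hc
  · have hs := strict s "()".toList (by decide) (by simpa using hi)
    rw [e1] at hs; omega
  · have hs := strict s "[]".toList (by decide) (by simpa using hi)
    rw [e2] at hs; omega
  · have hs := strict s "{}".toList (by decide) (by simpa using hi)
    rw [h] at hs; omega

theorem pvRep_all_brackets (s : List Char)
    (hb : ∀ c ∈ s, pvOpener c = true ∨ pvCloser c = true) :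
    ∀ c ∈ pvRep s, pvOpener c = true ∨ pvCloser c = true := by
  intro c hc
  apply hb
  have hsub : (pvRep s).Sublist s := by
    unfold pvRep
    exact ((pvReplace_sublist _ _ (by decide)).trans
      (pvReplace_sublist _ _ (by decide))).trans (pvReplace_sublist _ _ (by decide))
  exact hsub.subset hc

-- ===== B reduces to the machine =====
theorem pvBloop_eq_run (s : List Char)
    (hb : ∀ c ∈ s, pvOpener c = true ∨ pvCloser c = true) :
    pvBloop s = pvRun s [] := by
  rw [pvBloop]
  split
  · rename_i hfix
    by_cases hs : s = []
    · subst hs; rfl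
    · rw [pvRun_stuck s hb hs (pvRep_fixed_no_pair s hfix)]
      simp [hs]
  · rename_i hfix
    rw [pvBloop_eq_run (pvRep s) (pvRep_all_brackets s hb), pvRun_pvRep]
termination_by s.length
decreasing_by exact pvRep_ne_imp_lt s (by assumption)

theorem pvRun_filter (l st : List Char) :
    pvRun (l.filter (fun c => PySem.Chars.isIn [c] "()[]{}".toList)) st = pvRun l st := by
  induction l generalizing st with
  | nil => rfl
  | cons c rest ih =>
    have hsplit : (PySem.Chars.isIn [c] "()[]{}".toList) = (pvOpener c || pvCloser c) := by
      have h1 := pvIsIn_singleton c "()[]{}".toList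
      have h2 := pvIsIn_singleton c "{[(".toList
      have h3 := pvIsIn_singleton c ")}]".toList
      simp only [pvOpener, pvCloser]
      cases hx : PySem.Chars.isIn [c] "()[]{}".toList <;>
        cases hy : PySem.Chars.isIn [c] "{[(".toList <;>
        cases hz : PySem.Chars.isIn [c] ")}]".toList <;>
        simp_all
    rw [List.filter_cons]
    by_cases hbr : (PySem.Chars.isIn [c] "()[]{}".toList) = true
    · rw [if_pos hbr]
      rw [hsplit] at hbr
      rw [pvRun_cons, pvRun_cons]
      rcases Bool.or_eq_true_iff.mp hbr with ho | hc
      · rw [if_pos ho, if_pos ho, ih]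
      · by_cases ho : pvOpener c = true
        · rw [if_pos ho, if_pos ho, ih]
        · rw [if_neg ho, if_neg ho, if_pos hc, if_pos hc]
          cases st with
          | nil => rfl
          | cons t st' =>
            show (if (t == pvMate c) = true
                then pvRun (rest.filter (fun c => PySem.Chars.isIn [c] "()[]{}".toList)) st'
                else false)
              = (if (t == pvMate c) = true then pvRun rest st' else false)
            by_cases hm : (t == pvMate c) = true
            · rw [if_pos hm, if_pos hm, ih]
            · rw [if_neg hm, if_neg hm]
    · rw [if_neg hbr, ih]
      rw [hsplit] at hbr
      have ho : ¬ pvOpener c = true := fun h => hbr (by simp [h])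
      have hc : ¬ pvCloser c = true := fun h => hbr (by simp [h])
      rw [pvRun_cons, if_neg ho, if_neg hc]

theorem pvFilter_all_brackets (l : List Char) :
    ∀ c ∈ l.filter (fun c => PySem.Chars.isIn [c] "()[]{}".toList),
      pvOpener c = true ∨ pvCloser c = true := by
  intro c hc
  have hmem := (List.mem_filter.mp hc).2
  rw [pvIsIn_singleton] at hmem
  rcases (by simpa using hmem : c = '(' ∨ c = ')' ∨ c = '[' ∨ c = ']' ∨ c = '{' ∨ c = '}')
    with h | h | h | h | h | h <;> subst h <;> first | (left; decide) | (right; decide)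

-- ===== VERDICT (by name: the statement is the Claim_ definition above) =====
theorem is_valid_config_spec : Claim_equal_is_valid_config := by
  intro string _
  unfold Spec_is_valid_config is_valid_config is_valid_config_alt
  rw [pvGoA_eq_run, pvBloop_eq_run _ (pvFilter_all_brackets string.toList), pvRun_filter]
  rfl
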